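-- pv_equiv track=rewrite | github.com/amazon-science/CTF-Dojo | ctf_forge.py | get_category_specific_guidelines
-- ===== SOURCE A (Python) =====
-- from typing import Dict, List, Optional, Set, Any
--
-- def get_category_specific_guidelines(category: str, task_tags: List[str]) -> str:
--     """Generate category-specific guidelines for Dockerfile creation."""
--
--     category_lower = category.lower() if category else ""
--     tags_lower = [tag.lower() for tag in task_tags]
--
--     # Determine category from various sources
--     if category_lower == "web" or any("web" in tag for tag in tags_lower):
--         return """
-- WEB CHALLENGES:
-- - Install web server (apache2, nginx, or built-in server for frameworks)
-- - Install appropriate language runtime (php, python3, node.js, etc.)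
-- - If using Python, install python3 and python-is-python3 packages
-- - Copy web files to appropriate directory (/var/www/html for Apache)
-- - Configure web server to serve files properly
-- - Expose port 80 or 8080 for HTTP access
-- - Use COPY for static files, ensure proper permissions
-- - Example: COPY *.php /var/www/html/ && chmod 644 /var/www/html/*.php
-- - Start web server with CMD ["apache2ctl", "-D", "FOREGROUND"] or similar"""
--
--     elif category_lower == "pwn" or any("pwn" in tag for tag in tags_lower):
--         return """
-- PWN CHALLENGES:
-- - Install socat for network service hosting.
-- - Follow the general guidelines for hosting executables using a `run.sh` wrapper for maximum stability.
-- - Expose port 1337 (standard for pwn challenges).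
-- - May need additional libraries for binary execution, such as libc6:i386 for 32-bit binaries."""
--
--     elif category_lower == "crypto" or any("crypto" in tag for tag in tags_lower):
--
--         return """
-- CRYPTO CHALLENGES:
-- - Copy Python scripts to /challenge/ directory
-- - Install socat if hosting a crypto service
-- - Expose appropriate port (often 1337)
-- - Use CMD to run the crypto service
-- - Example: CMD ["python3", "/challenge/crypto_server.py"]
-- - Consider installing specific versions of crypto libraries if needed"""
--
--     elif category_lower == "rev" or any("rev" in tag for tag in tags_lower):
--         return """
-- REVERSE ENGINEERING CHALLENGES:
-- - Copy binary files to /challenge/ directory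
-- - Set executable permissions for binaries
-- - May need specific libraries or runtime environments
-- - If hosting a service, use socat with appropriate port
-- - Example: COPY binary /challenge/ && chmod +x /challenge/binary
-- - Consider if challenge needs to run as service or just provide downloadable binary"""
--
--     elif category_lower == "forensics" or any("forensics" in tag for tag in tags_lower):
--         return """
-- FORENSICS CHALLENGES:
-- - Copy evidence files to appropriate directory
-- - Install analysis tools if challenge provides online analysis
-- - May not need network service - could be file download only
-- - If hosting service, use appropriate web server
-- - Example: COPY evidence.* /challenge/
-- - Consider file integrity and proper permissions"""
--
--     else:  # misc or unknown
--         return """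
-- MISCELLANEOUS CHALLENGES:
-- - Analyze available files to determine service type
-- - Install appropriate runtime (python3 with python-is-python3, node.js, etc.) based on file types
-- - Copy all necessary files to /challenge/ directory
-- - Set appropriate permissions for executable files
-- - Choose port based on service type (1337 for general services)
-- - Use socat for simple TCP services or appropriate server for web-based challenges"""
-- ===== SOURCE B (Python) =====
-- _WEB = '\nWEB CHALLENGES:\n- Install web server (apache2, nginx, or built-in server for frameworks)\n- Install appropriate language runtime (php, python3, node.js, etc.)\n- If using Python, install python3 and python-is-python3 packages\n- Copy web files to appropriate directory (/var/www/html for Apache)\n- Configure web server to serve files properly\n- Expose port 80 or 8080 for HTTP access\n- Use COPY for static files, ensure proper permissions\n- Example: COPY *.php /var/www/html/ && chmod 644 /var/www/html/*.php\n- Start web server with CMD ["apache2ctl", "-D", "FOREGROUND"] or similar'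
-- _PWN = '\nPWN CHALLENGES:\n- Install socat for network service hosting.\n- Follow the general guidelines for hosting executables using a `run.sh` wrapper for maximum stability.\n- Expose port 1337 (standard for pwn challenges).\n- May need additional libraries for binary execution, such as libc6:i386 for 32-bit binaries.'
-- _CRYPTO = '\nCRYPTO CHALLENGES:\n- Copy Python scripts to /challenge/ directory\n- Install socat if hosting a crypto service\n- Expose appropriate port (often 1337)\n- Use CMD to run the crypto service\n- Example: CMD ["python3", "/challenge/crypto_server.py"]\n- Consider installing specific versions of crypto libraries if needed'
-- _REV = '\nREVERSE ENGINEERING CHALLENGES:\n- Copy binary files to /challenge/ directory\n- Set executable permissions for binaries\n- May need specific libraries or runtime environments\n- If hosting a service, use socat with appropriate port\n- Example: COPY binary /challenge/ && chmod +x /challenge/binary\n- Consider if challenge needs to run as service or just provide downloadable binary'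
-- _FORENSICS = '\nFORENSICS CHALLENGES:\n- Copy evidence files to appropriate directory\n- Install analysis tools if challenge provides online analysis\n- May not need network service - could be file download only\n- If hosting service, use appropriate web server\n- Example: COPY evidence.* /challenge/\n- Consider file integrity and proper permissions'
-- _MISC = '\nMISCELLANEOUS CHALLENGES:\n- Analyze available files to determine service type\n- Install appropriate runtime (python3 with python-is-python3, node.js, etc.) based on file types\n- Copy all necessary files to /challenge/ directory\n- Set appropriate permissions for executable files\n- Choose port based on service type (1337 for general services)\n- Use socat for simple TCP services or appropriate server for web-based challenges'
--
-- # priority of each keyword (lower number = stronger precedence), text table indexed by priority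
-- _PRIORITY = {"web": 0, "pwn": 1, "crypto": 2, "rev": 3, "forensics": 4}
-- _TEXTS = [_WEB, _PWN, _CRYPTO, _REV, _FORENSICS, _MISC]
--
--
-- def get_category_specific_guidelines(category, task_tags):
--     """Generate category-specific guidelines for Dockerfile creation."""
--     # start from the category's own priority (5 = misc if it names no known category)
--     best = 5
--     if category:
--         best = _PRIORITY.get(category.lower(), 5)
--     # one pass over the tags, keeping the minimum priority of any keyword seen in a tag
--     for tag in task_tags:
--         t = tag.lower()
--         for keyword, p in _PRIORITY.items():
--             if p < best and keyword in t:
--                 best = p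
--     return _TEXTS[best]
-- ===== Notes on version B (the rewrite author's own statement) =====
-- stated objective: alternative
-- what changed: Inverted the control structure: instead of A's keyword-ordered if/elif chain with early return (each branch rescanning all tags), B makes one pass over the tags maintaining a numeric minimum-priority accumulator (seeded from a category->priority dict lookup) and finally indexes a text table by that minimum.
import Mathlib
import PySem

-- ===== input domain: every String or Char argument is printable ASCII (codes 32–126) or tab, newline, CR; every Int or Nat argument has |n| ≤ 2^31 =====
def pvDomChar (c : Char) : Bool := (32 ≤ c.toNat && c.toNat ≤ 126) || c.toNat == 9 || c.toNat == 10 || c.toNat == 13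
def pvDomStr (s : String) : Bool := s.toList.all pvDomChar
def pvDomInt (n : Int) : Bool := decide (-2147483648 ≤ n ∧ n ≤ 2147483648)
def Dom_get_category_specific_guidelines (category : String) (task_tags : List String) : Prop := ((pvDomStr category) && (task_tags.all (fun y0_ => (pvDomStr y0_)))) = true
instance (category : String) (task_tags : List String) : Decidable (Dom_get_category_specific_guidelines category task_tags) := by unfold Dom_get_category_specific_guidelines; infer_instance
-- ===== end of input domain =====

-- B inverts A's control structure: one pass over the tags keeping a numeric minimum-priority
-- accumulator (seeded from a category→priority dict lookup), then an indexed-table lookup,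
-- instead of A's keyword-ordered if/elif chain that rescans the tags per branch (alternative; same cost).

-- Shared text constants (the literal guideline strings both programs return)
def txtWeb : String := "\nWEB CHALLENGES:\n- Install web server (apache2, nginx, or built-in server for frameworks)\n- Install appropriate language runtime (php, python3, node.js, etc.)\n- If using Python, install python3 and python-is-python3 packages\n- Copy web files to appropriate directory (/var/www/html for Apache)\n- Configure web server to serve files properly\n- Expose port 80 or 8080 for HTTP access\n- Use COPY for static files, ensure proper permissions\n- Example: COPY *.php /var/www/html/ && chmod 644 /var/www/html/*.php\n- Start web server with CMD [\"apache2ctl\", \"-D\", \"FOREGROUND\"] or similar"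
def txtPwn : String := "\nPWN CHALLENGES:\n- Install socat for network service hosting.\n- Follow the general guidelines for hosting executables using a `run.sh` wrapper for maximum stability.\n- Expose port 1337 (standard for pwn challenges).\n- May need additional libraries for binary execution, such as libc6:i386 for 32-bit binaries."
def txtCrypto : String := "\nCRYPTO CHALLENGES:\n- Copy Python scripts to /challenge/ directory\n- Install socat if hosting a crypto service\n- Expose appropriate port (often 1337)\n- Use CMD to run the crypto service\n- Example: CMD [\"python3\", \"/challenge/crypto_server.py\"]\n- Consider installing specific versions of crypto libraries if needed"
def txtRev : String := "\nREVERSE ENGINEERING CHALLENGES:\n- Copy binary files to /challenge/ directory\n- Set executable permissions for binaries\n- May need specific libraries or runtime environments\n- If hosting a service, use socat with appropriate port\n- Example: COPY binary /challenge/ && chmod +x /challenge/binary\n- Consider if challenge needs to run as service or just provide downloadable binary"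
def txtForensics : String := "\nFORENSICS CHALLENGES:\n- Copy evidence files to appropriate directory\n- Install analysis tools if challenge provides online analysis\n- May not need network service - could be file download only\n- If hosting service, use appropriate web server\n- Example: COPY evidence.* /challenge/\n- Consider file integrity and proper permissions"
def txtMisc : String := "\nMISCELLANEOUS CHALLENGES:\n- Analyze available files to determine service type\n- Install appropriate runtime (python3 with python-is-python3, node.js, etc.) based on file types\n- Copy all necessary files to /challenge/ directory\n- Set appropriate permissions for executable files\n- Choose port based on service type (1337 for general services)\n- Use socat for simple TCP services or appropriate server for web-based challenges"

-- ===== PORT A =====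
-- literal transliteration of A's if/elif chain
def get_category_specific_guidelines (category : String) (task_tags : List String) : String :=
  let category_lower := if category ≠ "" then PySem.Str.lower category else ""
  let tags_lower := task_tags.map PySem.Str.lower
  if category_lower == "web" || tags_lower.any (fun tag => PySem.Str.isIn "web" tag) then txtWeb
  else if category_lower == "pwn" || tags_lower.any (fun tag => PySem.Str.isIn "pwn" tag) then txtPwn
  else if category_lower == "crypto" || tags_lower.any (fun tag => PySem.Str.isIn "crypto" tag) then txtCrypto
  else if category_lower == "rev" || tags_lower.any (fun tag => PySem.Str.isIn "rev" tag) then txtRev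
  else if category_lower == "forensics" || tags_lower.any (fun tag => PySem.Str.isIn "forensics" tag) then txtForensics
  else txtMisc

-- ===== PORT B =====
-- Source B's _PRIORITY dict (keyword → priority) and _TEXTS table indexed by priority
def pvPrioDict : PySem.Dict String Nat :=
  PySem.Dict.mk [("web", 0), ("pwn", 1), ("crypto", 2), ("rev", 3), ("forensics", 4)]
def pvTexts : List String := [txtWeb, txtPwn, txtCrypto, txtRev, txtForensics, txtMisc]

-- Source B's inner 'for keyword, p in _PRIORITY.items(): if p < best and keyword in t: best = p'
def pvTagStep (t : String) (best : Nat) : Nat :=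
  pvPrioDict.items.foldl (fun b kp => if kp.2 < b && PySem.Str.isIn kp.1 t then kp.2 else b) best

def get_category_specific_guidelines_alt (category : String) (task_tags : List String) : String :=
  let best0 : Nat := if category ≠ "" then pvPrioDict.getD (PySem.Str.lower category) 5 else 5
  let best := task_tags.foldl (fun b tag => pvTagStep (PySem.Str.lower tag) b) best0
  -- best ≤ 5 always, so Python's _TEXTS[best] is in-range plain indexing
  pvTexts.getD best txtMisc

-- ===== PRECONDITION & SPEC =====
def Spec_get_category_specific_guidelines (category : String) (task_tags : List String) (out : String) : Prop := out = get_category_specific_guidelines_alt category task_tags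
instance (category : String) (task_tags : List String) (out : String) : Decidable (Spec_get_category_specific_guidelines category task_tags out) := by unfold Spec_get_category_specific_guidelines; infer_instance

-- ===== CLAIM =====
def Claim_equal_get_category_specific_guidelines : Prop := ∀ (category : String) (task_tags : List String), Dom_get_category_specific_guidelines category task_tags → Spec_get_category_specific_guidelines category task_tags (get_category_specific_guidelines category task_tags)

-- ===== LEMMAS AND PROOFS =====

-- index of the first true flag among five, 5 if none
def pvIdx (b0 b1 b2 b3 b4 : Bool) : Nat :=
  if b0 then 0 else if b1 then 1 else if b2 then 2 else if b3 then 3 else if b4 then 4 else 5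

theorem pvIdx_le (b0 b1 b2 b3 b4 : Bool) : pvIdx b0 b1 b2 b3 b4 ≤ 5 := by
  unfold pvIdx; split_ifs <;> omega

theorem pvTagStep_eq (t : String) (b : Nat) (hb : b ≤ 5) :
    pvTagStep t b = min b (pvIdx (PySem.Str.isIn "web" t) (PySem.Str.isIn "pwn" t)
      (PySem.Str.isIn "crypto" t) (PySem.Str.isIn "rev" t) (PySem.Str.isIn "forensics" t)) := by
  unfold pvTagStep pvIdx pvPrioDict
  simp only [List.foldl]
  rcases Bool.dichotomy (PySem.Str.isIn "web" t) with hw | hw <;>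
    rcases Bool.dichotomy (PySem.Str.isIn "pwn" t) with hp | hp <;>
    rcases Bool.dichotomy (PySem.Str.isIn "crypto" t) with hc | hc <;>
    rcases Bool.dichotomy (PySem.Str.isIn "rev" t) with hr | hr <;>
    rcases Bool.dichotomy (PySem.Str.isIn "forensics" t) with hf | hf <;>
    simp only [hw, hp, hc, hr, hf, Bool.and_false, Bool.and_true, if_false, if_true,
      decide_eq_true_eq, Bool.false_eq_true]
  all_goals first | omega | (split_ifs <;> omega)

theorem pvMin_idx (c0 c1 c2 c3 c4 t0 t1 t2 t3 t4 : Bool) :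
    min (pvIdx c0 c1 c2 c3 c4) (pvIdx t0 t1 t2 t3 t4) =
      pvIdx (c0 || t0) (c1 || t1) (c2 || t2) (c3 || t3) (c4 || t4) := by
  cases c0 <;> cases c1 <;> cases c2 <;> cases c3 <;> cases c4 <;>
    cases t0 <;> cases t1 <;> cases t2 <;> cases t3 <;> cases t4 <;> decide

theorem pvFold_eq (l : List String) (c0 c1 c2 c3 c4 : Bool) :
    l.foldl (fun b tag => pvTagStep (PySem.Str.lower tag) b) (pvIdx c0 c1 c2 c3 c4) =
      pvIdx (c0 || (l.map PySem.Str.lower).any (fun t => PySem.Str.isIn "web" t))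
            (c1 || (l.map PySem.Str.lower).any (fun t => PySem.Str.isIn "pwn" t))
            (c2 || (l.map PySem.Str.lower).any (fun t => PySem.Str.isIn "crypto" t))
            (c3 || (l.map PySem.Str.lower).any (fun t => PySem.Str.isIn "rev" t))
            (c4 || (l.map PySem.Str.lower).any (fun t => PySem.Str.isIn "forensics" t)) := by
  induction l generalizing c0 c1 c2 c3 c4 with
  | nil => simp
  | cons t ts ih =>
    simp only [List.foldl_cons, List.map_cons, List.any_cons]
    rw [pvTagStep_eq _ _ (pvIdx_le c0 c1 c2 c3 c4), pvMin_idx, ih]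
    simp only [Bool.or_assoc]

theorem pvBest0_eq (category : String) :
    (if category ≠ "" then pvPrioDict.getD (PySem.Str.lower category) 5 else 5) =
      (let cl := if category ≠ "" then PySem.Str.lower category else ""
       pvIdx (cl == "web") (cl == "pwn") (cl == "crypto") (cl == "rev") (cl == "forensics")) := by
  by_cases h : category = ""
  · subst h; decide
  · simp only [h, ne_eq, not_false_iff, if_true]
    unfold pvPrioDict pvIdx
    simp only [PySem.Dict.getD, PySem.Dict.get?_mk_cons]
    generalize PySem.Str.lower category = cl
    by_cases h0 : ("web" : String) == cl <;> by_cases h1 : ("pwn" : String) == cl <;>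
      by_cases h2 : ("crypto" : String) == cl <;> by_cases h3 : ("rev" : String) == cl <;>
      by_cases h4 : ("forensics" : String) == cl <;>
      simp_all [BEq.comm, PySem.Dict.get?]

theorem pvFinal (b0 b1 b2 b3 b4 : Bool) :
    (if b0 then txtWeb else if b1 then txtPwn else if b2 then txtCrypto
     else if b3 then txtRev else if b4 then txtForensics else txtMisc) =
      pvTexts.getD (pvIdx b0 b1 b2 b3 b4) txtMisc := by
  cases b0 <;> cases b1 <;> cases b2 <;> cases b3 <;> cases b4 <;> rfl

-- ===== VERDICT =====
theorem get_category_specific_guidelines_spec : Claim_equal_get_category_specific_guidelines := by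
  intro category task_tags _
  unfold Spec_get_category_specific_guidelines get_category_specific_guidelines get_category_specific_guidelines_alt
  rw [pvBest0_eq]
  simp only []
  rw [pvFold_eq, pvFinal]
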